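-- pv_equiv track=rewrite | github.com/Mehfila-Parkkulthil/normal-form-game-solver | normal_form_game.py | best_responses_p2
-- ===== SOURCE A (Python) =====
-- def best_responses_p2(strategies, payoff_matrix, s1):
--     best_payoff = None
--     best_moves = []
--     for s2 in strategies:
--         p2_payoff = payoff_matrix[(s1, s2)][1]
--         if best_payoff is None or p2_payoff > best_payoff:
--             best_payoff = p2_payoff
--             best_moves = [s2]
--         elif p2_payoff == best_payoff:
--             best_moves.append(s2)
--     return best_moves
-- ===== SOURCE B (Python) =====
-- def best_responses_p2(strategies, payoff_matrix, s1):
--     if not strategies: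
--         return []
--     payoffs = [payoff_matrix[(s1, s2)][1] for s2 in strategies]
--     best = max(payoffs)
--     return [s2 for s2, p in zip(strategies, payoffs) if p == best]
-- ===== Notes on version B (the rewrite author's own statement) =====
-- stated objective: simpler
-- what changed: B replaces A's fused scan that maintains an Optional running best and a reset-or-append move list with a build-then-max-then-filter decomposition: collect payoffs once, take max, filter the strategies tied at the max (same tie order).
import Mathlib
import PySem

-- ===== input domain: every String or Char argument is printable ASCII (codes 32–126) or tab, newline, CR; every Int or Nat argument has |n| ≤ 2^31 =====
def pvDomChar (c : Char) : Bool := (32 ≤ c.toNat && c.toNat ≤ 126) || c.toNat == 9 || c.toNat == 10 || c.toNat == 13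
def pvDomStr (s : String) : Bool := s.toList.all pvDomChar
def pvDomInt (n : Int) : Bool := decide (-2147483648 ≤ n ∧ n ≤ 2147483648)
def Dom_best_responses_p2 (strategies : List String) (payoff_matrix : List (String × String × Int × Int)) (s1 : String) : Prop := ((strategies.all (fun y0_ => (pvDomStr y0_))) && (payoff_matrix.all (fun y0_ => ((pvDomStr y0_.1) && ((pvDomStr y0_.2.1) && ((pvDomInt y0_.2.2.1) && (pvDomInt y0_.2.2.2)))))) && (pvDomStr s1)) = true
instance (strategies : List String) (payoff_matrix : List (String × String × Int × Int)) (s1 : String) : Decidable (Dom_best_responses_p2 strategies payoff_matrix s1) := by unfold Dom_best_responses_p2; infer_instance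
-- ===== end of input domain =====

-- B replaces A's fused scan (Optional running best + reset-or-append move list) by
-- build-payoffs-once, then max, then filter the tied strategies (same tie order); no speed claim.

-- shared dict access: payoff_matrix[(s1, s2)][1]; 'none' = KeyError (excluded by Pre_)
def pvPay2? (payoff_matrix : List (String × String × Int × Int)) (s1 s2 : String) : Option Int :=
  (payoff_matrix.find? (fun e => e.1 == s1 && e.2.1 == s2)).map (fun e => e.2.2.2)

-- ===== PORT A =====
-- loop body of A's for-loop (the fused scan)
def pvStepA (g : String → Int) (st : Option Int × List String) (s2 : String) : Option Int × List String :=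
  let p2_payoff := g s2
  match st.1 with
  | none => (some p2_payoff, [s2])
  | some b =>
    if b < p2_payoff then (some p2_payoff, [s2])
    else if p2_payoff = b then (some b, st.2 ++ [s2])
    else st

def best_responses_p2 (strategies : List String) (payoff_matrix : List (String × String × Int × Int)) (s1 : String) : List String :=
  (strategies.foldl (pvStepA (fun s2 => (pvPay2? payoff_matrix s1 s2).getD 0))
    ((none : Option Int), ([] : List String))).2
  -- getD 0 is unreachable under Pre_ (Python raises KeyError there)

-- ===== PORT B =====
def best_responses_p2_alt (strategies : List String) (payoff_matrix : List (String × String × Int × Int)) (s1 : String) : List String :=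
  if strategies.isEmpty then []
  else
    let payoffs := strategies.map (fun s2 => (pvPay2? payoff_matrix s1 s2).getD 0)
    let best := (PySem.List.max? payoffs (fun x => x)).getD 0  -- some _, since payoffs ≠ []
    ((strategies.zip payoffs).filter (fun q => q.2 == best)).map Prod.fst

-- ===== PRECONDITION & SPEC =====
-- Pre_: every strategy s2 has key (s1, s2) in the payoff matrix; otherwise Python A raises KeyError.
def Pre_best_responses_p2 (strategies : List String) (payoff_matrix : List (String × String × Int × Int)) (s1 : String) : Prop :=
  ∀ s2 ∈ strategies, ((payoff_matrix.find? (fun e => e.1 == s1 && e.2.1 == s2)).isSome : Bool) = true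
instance (strategies : List String) (payoff_matrix : List (String × String × Int × Int)) (s1 : String) : Decidable (Pre_best_responses_p2 strategies payoff_matrix s1) := by unfold Pre_best_responses_p2; infer_instance

def pvWitness_best_responses_p2 : List String × (List (String × String × Int × Int)) × String :=
  (["a", "b"], [("x", "a", 1, 2), ("x", "b", 0, 2)], "x")

def Spec_best_responses_p2 (strategies : List String) (payoff_matrix : List (String × String × Int × Int)) (s1 : String) (out : List String) : Prop := out = best_responses_p2_alt strategies payoff_matrix s1
instance (strategies : List String) (payoff_matrix : List (String × String × Int × Int)) (s1 : String) (out : List String) : Decidable (Spec_best_responses_p2 strategies payoff_matrix s1 out) := by unfold Spec_best_responses_p2; infer_instance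

-- ===== CLAIM (what is proved, stated in full; the proofs are below) =====
def Claim_equal_best_responses_p2 : Prop := ∀ (strategies : List String) (payoff_matrix : List (String × String × Int × Int)) (s1 : String), Dom_best_responses_p2 strategies payoff_matrix s1 → Pre_best_responses_p2 strategies payoff_matrix s1 → Spec_best_responses_p2 strategies payoff_matrix s1 (best_responses_p2 strategies payoff_matrix s1)

-- ===== LEMMAS AND PROOFS =====

theorem le_foldl_maxg (g : String → Int) (t : List String) :
    ∀ b : Int, b ≤ t.foldl (fun a s => max a (g s)) b := by
  induction t with
  | nil => simp
  | cons x y ih => exact fun b => le_trans (le_max_left _ _) (ih (max b (g x)))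

-- invariant of A's loop, for an arbitrary payoff function g
theorem foldA_inv (g : String → Int) (l : List String) :
    ∀ (b : Int) (ms : List String),
    l.foldl (pvStepA g) (some b, ms)
    = (some (l.foldl (fun a s => max a (g s)) b),
       (if b = l.foldl (fun a s => max a (g s)) b then ms else [])
         ++ l.filter (fun s => g s == l.foldl (fun a s => max a (g s)) b)) := by
  induction l with
  | nil => simp
  | cons s t ih =>
    intro b ms
    rw [List.foldl_cons, List.foldl_cons, List.filter_cons]
    by_cases h1 : b < g s
    · have hstep : pvStepA g (some b, ms) s = (some (g s), [s]) := by
        simp [pvStepA, h1]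
      have hmax : max b (g s) = g s := by omega
      have hb : ¬ (b = t.foldl (fun a s => max a (g s)) (max b (g s))) := by
        have := le_foldl_maxg g t (max b (g s)); omega
      rw [hmax] at hb
      rw [hstep, ih, hmax]
      set M := t.foldl (fun a s => max a (g s)) (g s) with hM
      by_cases h2 : g s = M <;> simp [h2, hb]
    · by_cases h2 : g s = b
      · have hstep : pvStepA g (some b, ms) s = (some b, ms ++ [s]) := by
          simp [pvStepA, h2]
        have hmax : max b (g s) = b := by omega
        rw [hstep, ih, hmax]
        set M := t.foldl (fun a s => max a (g s)) b with hM
        by_cases h3 : b = M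
        · have h4 : g s = M := by omega
          simp [h3, h4]
        · have h4 : ¬ (g s = M) := by omega
          simp [h3, h4]
      · have hstep : pvStepA g (some b, ms) s = (some b, ms) := by
          simp [pvStepA, h1, h2]
        have hmax : max b (g s) = b := by omega
        have h4 : ¬ (g s = t.foldl (fun a s => max a (g s)) b) := by
          have := le_foldl_maxg g t b; omega
        rw [hstep, ih, hmax]
        set M := t.foldl (fun a s => max a (g s)) b with hM
        simp [h4]

theorem zip_map_filter (g : String → Int) (M : Int) (l : List String) :
    (((l.zip (l.map g)).filter (fun q => q.2 == M)).map Prod.fst)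
      = l.filter (fun s => g s == M) := by
  induction l with
  | nil => rfl
  | cons s t ih =>
    simp only [List.map_cons, List.zip_cons_cons, List.filter_cons]
    by_cases h : g s = M <;> simp [h, ih]

-- ===== VERDICT (by name: the statement is the Claim_ definition above) =====
theorem best_responses_p2_spec : Claim_equal_best_responses_p2 := by
  intro strategies payoff_matrix s1 _ _
  unfold Spec_best_responses_p2 best_responses_p2 best_responses_p2_alt
  cases strategies with
  | nil => rfl
  | cons s t =>
    set g : String → Int := fun s2 => (pvPay2? payoff_matrix s1 s2).getD 0 with hg
    have hmax : PySem.List.max? ((s :: t).map g) (fun x => x)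
        = some ((t.map g).foldl max (g s)) := by
      simp [PySem.List.max?_id_cons]
    have hfm : (t.map g).foldl max (g s) = t.foldl (fun a x => max a (g x)) (g s) := by
      rw [List.foldl_map]
    have hstep0 : pvStepA g ((none : Option Int), ([] : List String)) s = (some (g s), [s]) := by
      simp [pvStepA]
    simp only [List.isEmpty_cons, Bool.false_eq_true, if_false, hmax, Option.getD_some, hfm,
      List.foldl_cons, hstep0, zip_map_filter g _ (s :: t)]
    rw [foldA_inv g t (g s) [s], List.filter_cons]
    set M := t.foldl (fun a x => max a (g x)) (g s) with hM
    by_cases h : g s = M <;> simp [h]
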